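-- pv_equiv track=rewrite | github.com/PetervanLunteren/AddaxAI | addaxai/utils/files.py | contains_special_characters
-- ===== SOURCE A (Python) =====
-- def contains_special_characters(path):
--     """Check if path contains characters outside the allowed set.
--
--     Returns:
--         [True, char] if a special character is found, [False, ""] otherwise.
--     """
--     allowed_characters = set(
--         "abcdefghijklmnopqrstuvwxyzABCDEFGHIJKLMNOPQRSTUVWXYZ0123456789_-./ +\\:'()"
--     )
--     for char in path:
--         if char not in allowed_characters:
--             return [True, char]
--     return [False, ""]
-- ===== SOURCE B (Python) =====
-- import re
--
-- _SPECIAL_RE = re.compile(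
--     r"[^a-zA-Z0-9_\-./ +\\:'()]"
-- )
--
-- def contains_special_characters(path):
--     m = _SPECIAL_RE.search(path)
--     if m:
--         return [True, m.group()]
--     return [False, ""]
-- ===== Notes on version B (the rewrite author's own statement) =====
-- stated objective: idiomatic
-- what changed: Replaced the explicit Python-level loop with set membership by a single compiled regex [^allowed] whose search finds the first disallowed character.
import Mathlib
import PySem

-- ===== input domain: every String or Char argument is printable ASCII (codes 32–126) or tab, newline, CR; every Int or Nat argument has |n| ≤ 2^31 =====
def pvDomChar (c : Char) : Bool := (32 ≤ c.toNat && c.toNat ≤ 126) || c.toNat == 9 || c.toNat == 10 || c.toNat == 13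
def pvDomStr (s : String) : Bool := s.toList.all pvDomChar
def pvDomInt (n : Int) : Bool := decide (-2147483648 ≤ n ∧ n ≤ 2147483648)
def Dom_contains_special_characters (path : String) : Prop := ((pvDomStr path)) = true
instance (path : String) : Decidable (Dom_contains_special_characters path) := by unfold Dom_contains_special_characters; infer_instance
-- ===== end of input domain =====

set_option maxRecDepth 4000


-- B replaces A's explicit character loop over a set by a single regex search for the
-- first character outside the allowed class (ported as find? over the negated class test); objective: idiomatic.

-- ===== PORT A =====
-- allowed_characters = set("abc…()")
def cscAllowedSet : PySem.Set Char :=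
  PySem.Set.ofList "abcdefghijklmnopqrstuvwxyzABCDEFGHIJKLMNOPQRSTUVWXYZ0123456789_-./ +\\:'()".toList

-- 'for char in path: if char not in allowed_characters: return [True, char]; return [False, ""]'
def cscLoopA : List Char → Bool × String
  | [] => (false, "")
  | c :: rest => if !(PySem.Set.contains cscAllowedSet c) then (true, String.ofList [c]) else cscLoopA rest

def contains_special_characters (path : String) : Bool × String :=
  cscLoopA path.toList

-- ===== PORT B =====
-- the regex character class [^a-zA-Z0-9_\-./ +\\:'()]: true iff c is ALLOWED
def cscAllowedB (c : Char) : Bool :=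
  ('a' ≤ c && c ≤ 'z') || ('A' ≤ c && c ≤ 'Z') || ('0' ≤ c && c ≤ '9')
    || "_-./ +\\:'()".toList.contains c

-- re.search of the negated class = first char failing cscAllowedB
def contains_special_characters_alt (path : String) : Bool × String :=
  match path.toList.find? (fun c => !cscAllowedB c) with
  | some c => (true, String.ofList [c])
  | none => (false, "")

-- ===== PRECONDITION & SPEC =====
def Spec_contains_special_characters (path : String) (out : Bool × String) : Prop := out = contains_special_characters_alt path
instance (path : String) (out : Bool × String) : Decidable (Spec_contains_special_characters path out) := by unfold Spec_contains_special_characters; infer_instance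

-- ===== CLAIM (what is proved, stated in full; the proofs are below) =====
def Claim_equal_contains_special_characters : Prop := ∀ (path : String), Dom_contains_special_characters path → Spec_contains_special_characters path (contains_special_characters path)

-- ===== LEMMAS AND PROOFS =====

-- the two membership tests agree on every domain character
theorem cscAllowed_eq (c : Char) (h : pvDomChar c = true) :
    PySem.Set.contains cscAllowedSet c = cscAllowedB c := by
  have hb : c.toNat ≤ 126 := by
    simp only [pvDomChar, Bool.or_eq_true, Bool.and_eq_true, decide_eq_true_eq,
      beq_iff_eq] at h
    omega
  obtain ⟨n, hn, rfl⟩ : ∃ n, n ≤ 126 ∧ c = Char.ofNat n :=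
    ⟨c.toNat, hb, (Char.ofNat_toNat c).symm⟩
  interval_cases n <;> decide

theorem cscLoop_eq (l : List Char) (h : ∀ c ∈ l, pvDomChar c = true) :
    cscLoopA l = (match l.find? (fun c => !cscAllowedB c) with
      | some c => (true, String.ofList [c])
      | none => (false, "")) := by
  induction l with
  | nil => rfl
  | cons c rest ih =>
    have hc := cscAllowed_eq c (h c (List.mem_cons_self ..))
    unfold cscLoopA
    rw [hc]
    by_cases hh : cscAllowedB c = true
    · simp only [List.find?, hh, Bool.not_true]
      exact ih (fun x hx => h x (List.mem_cons_of_mem _ hx))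
    · simp only [Bool.not_eq_true] at hh
      simp [List.find?, hh]

-- ===== VERDICT (by name: the statement is the Claim_ definition above) =====
theorem contains_special_characters_spec : Claim_equal_contains_special_characters := by
  intro path hdom
  unfold Spec_contains_special_characters contains_special_characters contains_special_characters_alt
  exact cscLoop_eq path.toList (by simpa [Dom_contains_special_characters, pvDomStr, List.all_eq_true] using hdom)
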